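-- pv_equiv track=rewrite | github.com/i12know/vaysf | middleware/schedule_workbook.py | _make_legacy_pool_game_pairs
-- ===== SOURCE A (Python) =====
-- from typing import Optional, List, Dict, Any, Tuple
--
-- def _make_legacy_pool_game_pairs(
--     prefix: str, n_teams: int, gpg: int
-- ) -> List[Tuple[str, str, str]]:
--     """Legacy balanced round-robin fallback for non-default pool-game targets."""
--     if n_teams < 2:
--         return []
--
--     target_pool_size = max(2, gpg + 1)
--     n_pools = max(1, n_teams // target_pool_size)
--
--     pools: List[List[int]] = [[] for _ in range(n_pools)]
--     for i in range(n_teams):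
--         pools[i % n_pools].append(i + 1)
--
--     team_id: Dict[int, str] = {}
--     for p_idx, pool_teams in enumerate(pools, start=1):
--         for t_idx, team_num in enumerate(pool_teams, start=1):
--             team_id[team_num] = f"{prefix}-P{p_idx}-T{t_idx}"
--
--     pairs: List[Tuple[str, str, str]] = []
--     for p_idx, pool_teams in enumerate(pools, start=1):
--         pool_id = f"P{p_idx}"
--         for i in range(len(pool_teams)):
--             for j in range(i + 1, len(pool_teams)):
--                 pairs.append((
--                     team_id[pool_teams[i]],
--                     team_id[pool_teams[j]],
--                     pool_id,
--                 ))
--     return pairs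
-- ===== SOURCE B (Python) =====
-- def _make_legacy_pool_game_pairs(prefix, n_teams, gpg):
--     """Round-robin pairs per pool, built from pool sizes alone (no pools list, no dict)."""
--     if n_teams < 2:
--         return []
--     target_pool_size = max(2, gpg + 1)
--     n_pools = max(1, n_teams // target_pool_size)
--     q, r = divmod(n_teams, n_pools)
--     pairs = []
--     for p in range(1, n_pools + 1):
--         size = q + (1 if p <= r else 0)
--         pool_id = f"P{p}"
--         for ti in range(1, size + 1):
--             a = f"{prefix}-P{p}-T{ti}"
--             for tj in range(ti + 1, size + 1):
--                 pairs.append((a, f"{prefix}-P{p}-T{tj}", pool_id))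
--     return pairs
-- ===== Notes on version B (the rewrite author's own statement) =====
-- stated objective: simpler
-- what changed: Derives each pool's team count from divmod(n_teams, n_pools) in closed form and emits the label strings directly per (pool, position-pair), eliminating A's pools list, team-number bookkeeping and team_id dict entirely.
import Mathlib
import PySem

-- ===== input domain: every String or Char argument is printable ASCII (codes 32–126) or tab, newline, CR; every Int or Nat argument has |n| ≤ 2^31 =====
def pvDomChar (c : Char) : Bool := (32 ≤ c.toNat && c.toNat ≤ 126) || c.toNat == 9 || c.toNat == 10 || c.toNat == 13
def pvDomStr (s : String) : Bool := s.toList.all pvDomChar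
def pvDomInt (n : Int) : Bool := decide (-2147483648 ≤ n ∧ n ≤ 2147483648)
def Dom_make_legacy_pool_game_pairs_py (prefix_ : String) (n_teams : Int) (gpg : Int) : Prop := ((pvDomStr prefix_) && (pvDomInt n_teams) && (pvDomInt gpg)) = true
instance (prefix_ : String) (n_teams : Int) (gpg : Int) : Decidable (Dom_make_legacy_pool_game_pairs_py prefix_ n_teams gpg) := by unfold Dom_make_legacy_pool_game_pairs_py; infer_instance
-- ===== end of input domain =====

-- B derives each pool's size from divmod(n_teams, n_pools) in closed form and emits the label
-- strings directly, eliminating A's pools list, team numbers and team_id dict (objective: simpler).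

-- ===== PORT A =====
-- team_id[...] is written with get?/getD "": the key is always present (Python never raises here),
-- so the default is never used; pools[i % n_pools] uses .toNat — exact since i % n_pools ≥ 0.
def make_legacy_pool_game_pairs_py (prefix_ : String) (n_teams : Int) (gpg : Int) :
    List (String × String × String) :=
  if n_teams < 2 then []
  else
    let target_pool_size : Int := max 2 (gpg + 1)
    let n_pools : Int := max 1 (PySem.Int.floordiv n_teams target_pool_size)
    let pools0 : List (List Int) := (PySem.List.pyRange 0 n_pools 1).map (fun _ => [])
    let pools : List (List Int) :=
      (PySem.List.pyRange 0 n_teams 1).foldl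
        (fun pools i => pools.modify (PySem.Int.mod i n_pools).toNat (fun l => l ++ [i + 1])) pools0
    let team_id : PySem.Dict Int String :=
      (PySem.List.enumerate pools 1).foldl
        (fun d pe =>
          (PySem.List.enumerate pe.2 1).foldl
            (fun d te =>
              d.insert te.2 (prefix_ ++ "-P" ++ PySem.Int.toStr pe.1 ++ "-T" ++ PySem.Int.toStr te.1)) d)
        PySem.Dict.empty
    (PySem.List.enumerate pools 1).foldl
      (fun pairs pe =>
        let pool_id := "P" ++ PySem.Int.toStr pe.1
        (PySem.List.pyRange 0 (pe.2.length : Int) 1).foldl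
          (fun pairs i =>
            (PySem.List.pyRange (i + 1) (pe.2.length : Int) 1).foldl
              (fun pairs j =>
                pairs ++ [((team_id.get? (PySem.List.pyGetD pe.2 i 0)).getD "",
                           (team_id.get? (PySem.List.pyGetD pe.2 j 0)).getD "",
                           pool_id)]) pairs) pairs) []

-- ===== PORT B =====
-- divmod(n_teams, n_pools) is ported as floordiv/mod (n_pools ≥ 1 ≠ 0, so divmod never raises)
def make_legacy_pool_game_pairs_py_alt (prefix_ : String) (n_teams : Int) (gpg : Int) :
    List (String × String × String) :=
  if n_teams < 2 then []
  else
    let target_pool_size : Int := max 2 (gpg + 1)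
    let n_pools : Int := max 1 (PySem.Int.floordiv n_teams target_pool_size)
    let q : Int := PySem.Int.floordiv n_teams n_pools
    let r : Int := PySem.Int.mod n_teams n_pools
    (PySem.List.pyRange 1 (n_pools + 1) 1).foldl
      (fun pairs p =>
        let size : Int := q + (if p ≤ r then 1 else 0)
        let pool_id := "P" ++ PySem.Int.toStr p
        (PySem.List.pyRange 1 (size + 1) 1).foldl
          (fun pairs ti =>
            let a := prefix_ ++ "-P" ++ PySem.Int.toStr p ++ "-T" ++ PySem.Int.toStr ti
            (PySem.List.pyRange (ti + 1) (size + 1) 1).foldl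
              (fun pairs tj =>
                pairs ++ [(a, prefix_ ++ "-P" ++ PySem.Int.toStr p ++ "-T" ++ PySem.Int.toStr tj,
                           pool_id)]) pairs) pairs) []

-- ===== PRECONDITION & SPEC =====
def Spec_make_legacy_pool_game_pairs_py (prefix_ : String) (n_teams : Int) (gpg : Int) (out : List (String × String × String)) : Prop := out = make_legacy_pool_game_pairs_py_alt prefix_ n_teams gpg
instance (prefix_ : String) (n_teams : Int) (gpg : Int) (out : List (String × String × String)) : Decidable (Spec_make_legacy_pool_game_pairs_py prefix_ n_teams gpg out) := by unfold Spec_make_legacy_pool_game_pairs_py; infer_instance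

-- ===== CLAIM (what is proved, stated in full; the proofs are below) =====
def Claim_equal_make_legacy_pool_game_pairs_py : Prop := ∀ (prefix_ : String) (n_teams : Int) (gpg : Int), Dom_make_legacy_pool_game_pairs_py prefix_ n_teams gpg → Spec_make_legacy_pool_game_pairs_py prefix_ n_teams gpg (make_legacy_pool_game_pairs_py prefix_ n_teams gpg)

-- ===== LEMMAS AND PROOFS =====

def pvLab (prefix_ : String) (p t : Int) : String :=
  prefix_ ++ "-P" ++ PySem.Int.toStr p ++ "-T" ++ PySem.Int.toStr t

/-- the contents of pool `k` (0-based) after distributing teams `1..N` over `P` pools -/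
def pvPool (N P k : Nat) : List Int :=
  ((List.range N).filter (fun i => i % P == k)).map (fun (i : Nat) => (i : Int) + 1)

def pvPools (N P : Nat) : List (List Int) := (List.range P).map (pvPool N P)

/-- the common shape both ports reduce to: for each pool, all position pairs -/
def pvCommon (prefix_ : String) (P : Nat) (sz : Nat → Nat) : List (String × String × String) :=
  (List.range P).foldl (fun acc (k : Nat) =>
    (List.range (sz k)).foldl (fun acc (i : Nat) =>
      (List.range (sz k - (i + 1))).foldl (fun acc (j : Nat) =>
        acc ++ [(pvLab prefix_ (1 + (k : Int)) (1 + (i : Int)),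
                 pvLab prefix_ (1 + (k : Int)) (1 + ((i : Int) + 1 + (j : Int))),
                 "P" ++ PySem.Int.toStr (1 + (k : Int)))]) acc) acc) []

lemma pvPool_succ (m P k : Nat) :
    pvPool (m + 1) P k = pvPool m P k ++ (if m % P = k then [(m : Int) + 1] else []) := by
  simp only [pvPool, List.range_succ, List.filter_append, List.filter_cons,
    List.filter_nil, beq_iff_eq]
  split_ifs <;> simp

lemma mem_pvPool {N P k : Nat} {x : Int} :
    x ∈ pvPool N P k ↔ ∃ i, i < N ∧ i % P = k ∧ x = (i : Int) + 1 := by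
  simp [pvPool]
  constructor
  · rintro ⟨i, ⟨hi, hk⟩, rfl⟩; exact ⟨i, hi, hk, rfl⟩
  · rintro ⟨i, hi, hk, rfl⟩; exact ⟨i, ⟨hi, hk⟩, rfl⟩

lemma pools_step (m P : Nat) :
    (pvPools m P).modify (m % P) (fun l => l ++ [(m : Int) + 1]) = pvPools (m + 1) P := by
  apply List.ext_getElem?
  intro k
  rw [List.getElem?_modify]
  simp only [pvPools, List.getElem?_map]
  by_cases hk : k < P
  · rw [List.getElem?_range hk]
    simp only [Option.map_some, Option.map_eq_map, Option.map_some]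
    rw [pvPool_succ]
    by_cases h : m % P = k
    · simp [h]
    · simp [h]
  · have h0 : (List.range P)[k]? = none := List.getElem?_eq_none (by simpa using hk)
    rw [h0]
    rfl

lemma pools_eq (N P : Nat) :
    (PySem.List.pyRange 0 (N : Int) 1).foldl
      (fun pools i => pools.modify (PySem.Int.mod i (P : Int)).toNat (fun l => l ++ [i + 1]))
      ((PySem.List.pyRange 0 (P : Int) 1).map (fun _ => ([] : List Int))) = pvPools N P := by
  induction N with
  | zero =>
      simp [PySem.List.pyRange_one, pvPools, pvPool, List.map_map, Function.comp]
  | succ m ih =>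
      have hsplit : PySem.List.pyRange 0 ((m + 1 : Nat) : Int) 1
          = PySem.List.pyRange 0 (m : Int) 1 ++ [(m : Int)] := by
        push_cast
        exact PySem.List.pyRange_one_succ_right (by positivity)
      rw [hsplit, List.foldl_append, ih]
      simp only [List.foldl_cons, List.foldl_nil]
      have hmod : (PySem.Int.mod (m : Int) (P : Int)).toNat = m % P := by
        rw [PySem.Int.mod_natCast]; rfl
      rw [hmod, pools_step m P]

lemma pvPool_length (N P k : Nat) (hP : 0 < P) (hk : k < P) :
    (pvPool N P k).length = N / P + if k < N % P then 1 else 0 := by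
  induction N with
  | zero => simp [pvPool]
  | succ m ih =>
      rw [pvPool_succ]
      have hm : m % P < P := Nat.mod_lt _ hP
      have hdvd : (P ∣ m + 1) ↔ (m + 1) % P = 0 := Nat.dvd_iff_mod_eq_zero
      have hmod : (m + 1) % P = if m % P + 1 = P then 0 else m % P + 1 := by
        rcases Nat.lt_or_ge 1 P with h1 | h1
        · have h2 : (m + 1) % P = (m % P + 1) % P := by
            conv_lhs => rw [Nat.add_mod, Nat.mod_eq_of_lt h1]
          rw [h2]
          split_ifs with h3
          · rw [h3, Nat.mod_self]
          · exact Nat.mod_eq_of_lt (by omega)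
        · have hp1 : P = 1 := by omega
          subst hp1; simp [Nat.mod_one]
      rw [Nat.succ_div, List.length_append, ih]
      simp only [hdvd, hmod]
      split_ifs <;> simp_all <;> omega

lemma pvPool_nodup (N P k : Nat) : (pvPool N P k).Nodup := by
  rw [pvPool]
  refine List.Nodup.map (fun a b h => by omega) ((List.nodup_range).filter _)

lemma pools_flatten_nodup (N P : Nat) : (pvPools N P).flatten.Nodup := by
  rw [List.nodup_flatten]
  constructor
  · intro l hl
    simp only [pvPools, List.mem_map] at hl
    obtain ⟨k, _, rfl⟩ := hl
    exact pvPool_nodup N P k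
  · rw [pvPools, List.pairwise_map]
    refine List.Pairwise.imp ?_ (List.pairwise_lt_range (n := P))
    intro a b hab x hxa hxb
    rw [mem_pvPool] at hxa hxb
    obtain ⟨i, _, hia, hxi⟩ := hxa
    obtain ⟨i', _, hib, hxi'⟩ := hxb
    have hii : i = i' := by omega
    rw [hii] at hia
    exact absurd (hia.symm.trans hib) (by omega)

-- dict lemmas: a fold of inserts with globally distinct keys behaves as an association list
lemma get?_foldl_insert_not_mem {κ ν : Type} [BEq κ] [LawfulBEq κ] (l : List (κ × ν))
    (d : PySem.Dict κ ν) (k : κ) (h : k ∉ l.map Prod.fst) :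
    (l.foldl (fun d p => d.insert p.1 p.2) d).get? k = d.get? k := by
  induction l generalizing d with
  | nil => rfl
  | cons p rest ih =>
      simp only [List.map_cons, List.mem_cons, not_or] at h
      rw [List.foldl_cons, ih _ h.2, PySem.Dict.get?_insert_of_ne]
      exact fun hh => h.1 hh

lemma get?_foldl_insert_mem {κ ν : Type} [BEq κ] [LawfulBEq κ] (l : List (κ × ν))
    (d : PySem.Dict κ ν) (k : κ) (v : ν) (hnd : (l.map Prod.fst).Nodup) (hmem : (k, v) ∈ l) :
    (l.foldl (fun d p => d.insert p.1 p.2) d).get? k = some v := by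
  induction l generalizing d with
  | nil => cases hmem
  | cons p rest ih =>
      simp only [List.map_cons, List.nodup_cons] at hnd
      rcases List.mem_cons.mp hmem with h | h
      · subst h
        rw [List.foldl_cons, get?_foldl_insert_not_mem _ _ _ hnd.1,
          PySem.Dict.get?_insert_self]
      · exact ih _ hnd.2 h

lemma foldl_foldl_flatMap {α β γ : Type} (l : List α) (g : α → List β) (f : γ → β → γ)
    (init : γ) :
    l.foldl (fun d a => (g a).foldl f d) init = (l.flatMap g).foldl f init := by
  induction l generalizing init with
  | nil => rfl
  | cons a rest ih => simp [List.flatMap_cons, List.foldl_append, ih]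

lemma enumerate_map {α β : Type} (l : List α) (f : α → β) (s : Int) :
    PySem.List.enumerate (l.map f) s = (PySem.List.enumerate l s).map (fun p => (p.1, f p.2)) := by
  induction l generalizing s with
  | nil => rfl
  | cons a rest ih => simp [PySem.List.enumerate_cons, ih]

lemma enumerate_range (P : Nat) (s : Int) :
    PySem.List.enumerate (List.range P) s
      = (List.range P).map (fun (k : Nat) => (s + (k : Int), k)) := by
  induction P with
  | zero => rfl
  | succ m ih =>
      rw [List.range_succ, PySem.List.enumerate_append, ih]
      simp [PySem.List.enumerate_cons]

-- the key-value list the team_id dict is built from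
def pvKvs (prefix_ : String) (N P : Nat) : List (Int × String) :=
  (PySem.List.enumerate (pvPools N P) 1).flatMap
    (fun pe => (PySem.List.enumerate pe.2 1).map
      (fun te => (te.2, pvLab prefix_ pe.1 te.1)))

lemma pvKvs_keys (prefix_ : String) (N P : Nat) :
    (pvKvs prefix_ N P).map Prod.fst = (pvPools N P).flatten := by
  rw [pvKvs, List.map_flatMap]
  have h : ∀ pe : Int × List Int,
      ((PySem.List.enumerate pe.2 1).map
        (fun te => (te.2, pvLab prefix_ pe.1 te.1))).map Prod.fst = pe.2 := by
    intro pe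
    rw [List.map_map]
    exact PySem.List.map_snd_enumerate pe.2 1
  simp only [h]
  rw [List.flatMap_def, PySem.List.map_snd_enumerate]

lemma pvKvs_mem (prefix_ : String) (N P k t : Nat) (hk : k < P)
    (ht : t < (pvPool N P k).length) :
    ((pvPool N P k)[t], pvLab prefix_ (1 + (k : Int)) (1 + (t : Int))) ∈ pvKvs prefix_ N P := by
  rw [pvKvs, List.mem_flatMap]
  refine ⟨(1 + (k : Int), pvPool N P k), ?_, ?_⟩
  · rw [PySem.List.mem_enumerate_iff]
    exact ⟨k, by simpa [pvPools] using hk, by simp [pvPools]⟩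
  · rw [List.mem_map]
    refine ⟨(1 + (t : Int), (pvPool N P k)[t]), ?_, rfl⟩
    rw [PySem.List.mem_enumerate_iff]
    exact ⟨t, ht, rfl⟩

def pvTeamId (prefix_ : String) (N P : Nat) : PySem.Dict Int String :=
  (pvKvs prefix_ N P).foldl (fun d p => d.insert p.1 p.2) PySem.Dict.empty

lemma pvTeamId_eq (prefix_ : String) (N P : Nat) :
    (PySem.List.enumerate (pvPools N P) 1).foldl
      (fun d pe => (PySem.List.enumerate pe.2 1).foldl
        (fun d te =>
          d.insert te.2 (prefix_ ++ "-P" ++ PySem.Int.toStr pe.1 ++ "-T" ++ PySem.Int.toStr te.1)) d)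
      PySem.Dict.empty = pvTeamId prefix_ N P := by
  rw [pvTeamId, pvKvs, ← foldl_foldl_flatMap]
  apply PySem.List.foldl_congr_mem
  intro d pe _
  rw [List.foldl_map]
  rfl

lemma pvTeamId_get (prefix_ : String) (N P k t : Nat) (hk : k < P)
    (ht : t < (pvPool N P k).length) :
    (pvTeamId prefix_ N P).get? (pvPool N P k)[t]
      = some (pvLab prefix_ (1 + (k : Int)) (1 + (t : Int))) := by
  apply get?_foldl_insert_mem
  · rw [pvKvs_keys]; exact pools_flatten_nodup N P
  · exact pvKvs_mem prefix_ N P k t hk ht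

-- A's dict lookup at a pool element, as it appears in the pair loop
lemma lookup_at (prefix_ : String) (N P k t : Nat) (hk : k < P)
    (ht : t < (pvPool N P k).length) :
    ((pvTeamId prefix_ N P).get? (PySem.List.pyGetD (pvPool N P k) (t : Int) 0)).getD ""
      = pvLab prefix_ (1 + (k : Int)) (1 + (t : Int)) := by
  rw [PySem.List.pyGetD_eq_getElem _ _ (by positivity) (by exact_mod_cast ht)]
  simp only [Int.toNat_natCast]
  rw [pvTeamId_get prefix_ N P k t hk ht]
  rfl

-- A's pair loop over the characterised pools equals the common shape
lemma A_side (prefix_ : String) (N P : Nat) :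
    (PySem.List.enumerate (pvPools N P) 1).foldl
      (fun pairs pe =>
        (PySem.List.pyRange 0 (pe.2.length : Int) 1).foldl
          (fun pairs i =>
            (PySem.List.pyRange (i + 1) (pe.2.length : Int) 1).foldl
              (fun pairs j =>
                pairs ++ [(((pvTeamId prefix_ N P).get? (PySem.List.pyGetD pe.2 i 0)).getD "",
                           ((pvTeamId prefix_ N P).get? (PySem.List.pyGetD pe.2 j 0)).getD "",
                           "P" ++ PySem.Int.toStr pe.1)]) pairs) pairs) []
      = pvCommon prefix_ P (fun k => (pvPool N P k).length) := by
  rw [pvPools, enumerate_map, enumerate_range, List.map_map, List.foldl_map, pvCommon]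
  apply PySem.List.foldl_congr_mem
  intro acc k hkmem
  have hk : k < P := List.mem_range.mp hkmem
  simp only [Function.comp]
  rw [PySem.List.pyRange_one]
  simp only [zero_add, Int.sub_zero, Int.toNat_natCast]
  rw [List.foldl_map]
  apply PySem.List.foldl_congr_mem
  intro acc2 i himem
  have hi : i < (pvPool N P k).length := List.mem_range.mp himem
  rw [PySem.List.pyRange_one]
  have hcast : ((((pvPool N P k).length : Int) - ((i : Int) + 1)).toNat)
      = (pvPool N P k).length - (i + 1) := by omega
  rw [hcast, List.foldl_map]
  apply PySem.List.foldl_congr_mem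
  intro acc3 j hjmem
  have hj : j < (pvPool N P k).length - (i + 1) := List.mem_range.mp hjmem
  rw [show (i : Int) + 1 + (j : Int) = ((i + 1 + j : Nat) : Int) from by push_cast; ring]
  rw [lookup_at prefix_ N P k i hk (by omega), lookup_at prefix_ N P k (i + 1 + j) hk (by omega)]

-- B's loops equal the common shape with the divmod-derived sizes
lemma B_side (prefix_ : String) (N P : Nat) :
    (PySem.List.pyRange 1 ((P : Int) + 1) 1).foldl
      (fun pairs p =>
        (PySem.List.pyRange 1
            ((((N / P : Nat) : Int) + (if p ≤ ((N % P : Nat) : Int) then 1 else 0)) + 1) 1).foldl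
          (fun pairs ti =>
            (PySem.List.pyRange (ti + 1)
                ((((N / P : Nat) : Int) + (if p ≤ ((N % P : Nat) : Int) then 1 else 0)) + 1) 1).foldl
              (fun pairs tj =>
                pairs ++ [(prefix_ ++ "-P" ++ PySem.Int.toStr p ++ "-T" ++ PySem.Int.toStr ti,
                           prefix_ ++ "-P" ++ PySem.Int.toStr p ++ "-T" ++ PySem.Int.toStr tj,
                           "P" ++ PySem.Int.toStr p)]) pairs) pairs) []
      = pvCommon prefix_ P (fun k => N / P + if k < N % P then 1 else 0) := by
  have houter : PySem.List.pyRange 1 ((P : Int) + 1) 1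
      = (List.range P).map (fun (k : Nat) => 1 + (k : Int)) := by
    rw [PySem.List.pyRange_one, show (((P : Int) + 1) - 1).toNat = P from by omega]
  rw [houter, List.foldl_map, pvCommon]
  apply PySem.List.foldl_congr_mem
  intro acc k hkmem
  have hk : k < P := List.mem_range.mp hkmem
  have hsz : ((N / P : Nat) : Int) + (if (1 + (k : Int)) ≤ ((N % P : Nat) : Int) then 1 else 0)
      = ((N / P + if k < N % P then 1 else 0 : Nat) : Int) := by
    split_ifs <;> omega
  rw [hsz]
  set S := N / P + if k < N % P then 1 else 0 with hS
  have hinner : PySem.List.pyRange 1 ((S : Int) + 1) 1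
      = (List.range S).map (fun (i : Nat) => 1 + (i : Int)) := by
    rw [PySem.List.pyRange_one, show (((S : Int) + 1) - 1).toNat = S from by simp]
  rw [hinner, List.foldl_map]
  apply PySem.List.foldl_congr_mem
  intro acc2 i himem
  have hi : i < S := List.mem_range.mp himem
  have hinner2 : PySem.List.pyRange ((1 + (i : Int)) + 1) ((S : Int) + 1) 1
      = (List.range (S - (i + 1))).map (fun (j : Nat) => (1 + (i : Int)) + 1 + (j : Int)) := by
    rw [PySem.List.pyRange_one,
      show (((S : Int) + 1) - ((1 + (i : Int)) + 1)).toNat = S - (i + 1) from by omega]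
  rw [hinner2, List.foldl_map]
  apply PySem.List.foldl_congr_mem
  intro acc3 j hjmem
  rw [show (1 + ((i : Int) + 1 + (j : Int))) = 1 + (i : Int) + 1 + (j : Int) from by ring]
  rfl

lemma pvCommon_congr (prefix_ : String) (P : Nat) (sz sz' : Nat → Nat)
    (h : ∀ k < P, sz k = sz' k) : pvCommon prefix_ P sz = pvCommon prefix_ P sz' := by
  rw [pvCommon, pvCommon]
  apply PySem.List.foldl_congr_mem
  intro acc k hkmem
  rw [h k (List.mem_range.mp hkmem)]

-- ===== VERDICT (by name: the statement is the Claim_ definition above) =====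
theorem make_legacy_pool_game_pairs_py_spec : Claim_equal_make_legacy_pool_game_pairs_py := by
  intro prefix_ n_teams gpg _
  unfold Spec_make_legacy_pool_game_pairs_py
  unfold make_legacy_pool_game_pairs_py make_legacy_pool_game_pairs_py_alt
  by_cases hlt : n_teams < 2
  · simp [hlt]
  · have hN0 : 0 ≤ n_teams := by omega
    obtain ⟨N, rfl⟩ : ∃ N : Nat, n_teams = (N : Int) := ⟨n_teams.toNat, by omega⟩
    rw [if_neg hlt, if_neg hlt]
    dsimp only
    have hnP1 : 1 ≤ max 1 (PySem.Int.floordiv (N : Int) (max 2 (gpg + 1))) := le_max_left _ _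
    obtain ⟨P, hPeq⟩ : ∃ P : Nat, max 1 (PySem.Int.floordiv (N : Int) (max 2 (gpg + 1))) = (P : Int) :=
      ⟨(max 1 (PySem.Int.floordiv (N : Int) (max 2 (gpg + 1)))).toNat, by omega⟩
    have hP : 0 < P := by omega
    rw [hPeq, pools_eq N P, pvTeamId_eq prefix_ N P, A_side prefix_ N P,
      PySem.Int.floordiv_natCast, PySem.Int.mod_natCast, B_side prefix_ N P]
    exact pvCommon_congr prefix_ P _ _ (fun k hk => pvPool_length N P k hP hk)
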